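-- pv_equiv track=rewrite | github.com/tokamak-network/tokamak-sybil-resistance | circuits/circuits/smt.py | SMTLevIns
-- ===== SOURCE A (Python) =====
-- def IsEqual(a, b):
--     return int(a == b)
--
-- def SMTLevIns(siblings, enabled):
--     n_levels = len(siblings)
--     lev_ins = [0] * n_levels
--     prev = enabled
--     for i in range(n_levels):
--         lev_ins[i] = prev * (1 - IsEqual(siblings[i], 0))
--         prev = lev_ins[i]
--     return lev_ins
-- ===== SOURCE B (Python) =====
-- def SMTLevIns(siblings, enabled):
--     cut = next((i for i, s in enumerate(siblings) if s == 0), len(siblings))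
--     return [enabled] * cut + [0] * (len(siblings) - cut)
-- ===== Notes on version B (the rewrite author's own statement) =====
-- stated objective: simpler
-- what changed: Replaces the running-product loop by finding the index of the first zero sibling and concatenating a prefix of `enabled` with a zero tail.
import Mathlib
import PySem

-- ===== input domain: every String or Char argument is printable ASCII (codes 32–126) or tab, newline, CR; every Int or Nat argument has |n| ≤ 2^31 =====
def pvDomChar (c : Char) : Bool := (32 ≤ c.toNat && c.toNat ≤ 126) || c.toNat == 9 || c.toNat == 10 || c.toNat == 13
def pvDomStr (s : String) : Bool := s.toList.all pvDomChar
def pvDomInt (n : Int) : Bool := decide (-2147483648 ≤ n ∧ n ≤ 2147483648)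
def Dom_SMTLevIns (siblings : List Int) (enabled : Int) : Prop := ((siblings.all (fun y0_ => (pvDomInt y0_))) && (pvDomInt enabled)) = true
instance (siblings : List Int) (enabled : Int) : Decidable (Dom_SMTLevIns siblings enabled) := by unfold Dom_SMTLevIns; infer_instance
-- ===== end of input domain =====

-- B finds the first zero sibling and builds the result as prefix ++ zero tail, instead of A's running-product loop (objective: simpler).


-- ===== PORT A =====
-- helper IsEqual(a, b) = int(a == b)
def IsEqualPort (a b : Int) : Int := if a == b then 1 else 0

-- A's loop writes lev_ins[i] = prev * (1 - IsEqual(siblings[i], 0)) and carries prev;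
-- ported as structural recursion over siblings with the same carried state.
def SMTLevInsLoop (prev : Int) (siblings : List Int) : List Int :=
  match siblings with
  | [] => []
  | s :: rest =>
    let v := prev * (1 - IsEqualPort s 0)
    v :: SMTLevInsLoop v rest

def SMTLevIns (siblings : List Int) (enabled : Int) : List Int :=
  SMTLevInsLoop enabled siblings

-- ===== PORT B =====
-- B: cut = index of first zero (or length), result = [enabled]*cut ++ [0]*(n-cut)
def SMTLevIns_alt (siblings : List Int) (enabled : Int) : List Int :=
  let cut := siblings.findIdx (fun s => s == 0)
  List.replicate cut enabled ++ List.replicate (siblings.length - cut) 0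

-- ===== PRECONDITION & SPEC =====
def Spec_SMTLevIns (siblings : List Int) (enabled : Int) (out : List Int) : Prop := out = SMTLevIns_alt siblings enabled
instance (siblings : List Int) (enabled : Int) (out : List Int) : Decidable (Spec_SMTLevIns siblings enabled out) := by unfold Spec_SMTLevIns; infer_instance

-- ===== CLAIM (what is proved, stated in full; the proofs are below) =====
def Claim_equal_SMTLevIns : Prop := ∀ (siblings : List Int) (enabled : Int), Dom_SMTLevIns siblings enabled → Spec_SMTLevIns siblings enabled (SMTLevIns siblings enabled)

-- ===== LEMMAS AND PROOFS =====
theorem loop_zero (l : List Int) : SMTLevInsLoop 0 l = List.replicate l.length 0 := by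
  induction l with
  | nil => rfl
  | cons s rest ih => simp [SMTLevInsLoop, ih, List.replicate]

theorem loop_eq (l : List Int) (prev : Int) :
    SMTLevInsLoop prev l =
      List.replicate (l.findIdx (fun s => s == 0)) prev ++
        List.replicate (l.length - l.findIdx (fun s => s == 0)) 0 := by
  induction l generalizing prev with
  | nil => rfl
  | cons s rest ih =>
    by_cases h : s = 0
    · subst h
      simp [SMTLevInsLoop, IsEqualPort, List.findIdx_cons, loop_zero, List.replicate]
    · have hb : (fun s => s == 0) s = false := by simp [h]
      simp [SMTLevInsLoop, IsEqualPort, List.findIdx_cons, hb, ih, List.replicate]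

-- ===== VERDICT (by name: the statement is the Claim_ definition above) =====
theorem SMTLevIns_spec : Claim_equal_SMTLevIns := by
  intro siblings enabled _
  unfold Spec_SMTLevIns SMTLevIns SMTLevIns_alt
  exact loop_eq siblings enabled
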